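-- pv_equiv track=rewrite | github.com/IlariaCattaneo/Algorithms-Data-Structures | Algo_exercises/Esercizi_preparazione_esame/midterm_exam_2024.py | algo_x
-- ===== SOURCE A (Python) =====
-- def algo_x(A):
--     n = len(A)
--     x = 0
--     for i in range(n):
--         for j in range(n):
--             for k in range(n):
--                 if A[k] - A[j] == 1 and A[j] - A[i] == 1:
--                     x += 1
--     return x
-- ===== SOURCE B (Python) =====
-- def algo_x(A):
--     freq = {}
--     for v in A:
--         freq[v] = freq.get(v, 0) + 1
--     x = 0
--     for v, c in freq.items():
--         x += c * freq.get(v + 1, 0) * freq.get(v + 2, 0)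
--     return x
-- ===== Notes on version B (the rewrite author's own statement) =====
-- stated objective: faster
-- what changed: Replaces the O(n^3) triple index loop by a frequency dictionary built in one pass, summing count(v)*count(v+1)*count(v+2) over the distinct values.
import Mathlib
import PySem

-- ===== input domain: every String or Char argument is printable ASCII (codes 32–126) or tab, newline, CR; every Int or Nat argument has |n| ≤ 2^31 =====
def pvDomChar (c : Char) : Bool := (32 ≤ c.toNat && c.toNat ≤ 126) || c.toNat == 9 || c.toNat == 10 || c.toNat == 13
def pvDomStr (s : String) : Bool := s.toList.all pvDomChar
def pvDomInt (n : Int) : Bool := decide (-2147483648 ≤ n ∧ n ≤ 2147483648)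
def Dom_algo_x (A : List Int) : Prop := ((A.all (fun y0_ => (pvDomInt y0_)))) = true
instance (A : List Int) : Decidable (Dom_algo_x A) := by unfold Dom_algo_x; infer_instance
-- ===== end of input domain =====

-- B replaces A's O(n^3) triple index loop by a one-pass frequency dictionary and a sum of
-- count(v)*count(v+1)*count(v+2) over distinct values (objective: faster, asymptotically).

-- ===== PORT A =====
def algo_x (A : List Int) : Int :=
  let n : Int := PySem.List.len A
  (PySem.List.pyRange 0 n).foldl (fun x i =>
    (PySem.List.pyRange 0 n).foldl (fun x j =>
      (PySem.List.pyRange 0 n).foldl (fun x k =>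
        if PySem.List.pyGetD A k 0 - PySem.List.pyGetD A j 0 = 1 ∧
           PySem.List.pyGetD A j 0 - PySem.List.pyGetD A i 0 = 1
        then x + 1 else x) x) x) 0

-- ===== PORT B =====
def algo_x_alt (A : List Int) : Int :=
  let freq : PySem.Dict Int Int :=
    A.foldl (fun d v => d.insert v (d.getD v 0 + 1)) PySem.Dict.empty
  freq.items.foldl (fun x p =>
    x + p.2 * freq.getD (p.1 + 1) 0 * freq.getD (p.1 + 2) 0) 0

-- ===== PRECONDITION & SPEC =====
def Spec_algo_x (A : List Int) (out : Int) : Prop := out = algo_x_alt A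
instance (A : List Int) (out : Int) : Decidable (Spec_algo_x A out) := by unfold Spec_algo_x; infer_instance

-- ===== CLAIM (what is proved, stated in full; the proofs are below) =====
def Claim_equal_algo_x : Prop := ∀ (A : List Int), Dom_algo_x A → Spec_algo_x A (algo_x A)

-- ===== LEMMAS AND PROOFS =====

-- sum of an 'only at value t' map is count t times the value there
theorem pv_sum_if_eq_count (l : List Int) (t : Int) (c : Int → Int) :
    (l.map (fun b => if b = t then c b else 0)).sum = (l.count t : Int) * c t := by
  induction l with
  | nil => simp
  | cons a l ih =>
    simp only [List.map_cons, List.sum_cons, ih, List.count_cons]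
    by_cases h : a = t
    · subst h; simp; ring
    · simp [h]

-- over a nodup list, the 'only at a' sum picks the single term
theorem pv_sum_if_eq_single (S : List Int) (hS : S.Nodup) (a : Int) (ha : a ∈ S) (c : Int → Int) :
    (S.map (fun v => if v = a then c v else 0)).sum = c a := by
  induction S with
  | nil => simp at ha
  | cons y ys ih =>
    simp only [List.map_cons, List.sum_cons]
    rcases List.mem_cons.mp ha with h | h
    · have hz : ∀ v ∈ ys, (if v = a then c v else 0) = 0 := by
        intro v hv
        have hvy : v ≠ a := by
          intro e
          exact (List.nodup_cons.mp hS).1 ((e.trans h) ▸ hv)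
        simp [hvy]
      rw [List.map_congr_left hz]
      simp [← h]
    · have hya : y ≠ a := fun e => (List.nodup_cons.mp hS).1 (e ▸ h)
      rw [ih (List.nodup_cons.mp hS).2 h]
      simp [hya]

-- grouping: a sum over A equals the count-weighted sum over any nodup list with A's members
theorem pv_sum_group (S : List Int) (hS : S.Nodup) (g : Int → Int) :
    ∀ (A : List Int), (∀ a ∈ A, a ∈ S) →
      (S.map (fun v => (A.count v : Int) * g v)).sum = (A.map g).sum := by
  intro A
  induction A with
  | nil => intro _; simp
  | cons a t ih =>
    intro h
    have ha : a ∈ S := h a (List.mem_cons_self)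
    have ht : ∀ x ∈ t, x ∈ S := fun x hx => h x (List.mem_cons_of_mem a hx)
    have step : ∀ v ∈ S, ((a :: t).count v : Int) * g v
        = (t.count v : Int) * g v + (if v = a then g v else 0) := by
      intro v _
      rw [List.count_cons]
      by_cases hv : v = a
      · subst hv; simp; ring
      · have hav : a ≠ v := fun e => hv e.symm
        simp [hav]
        intro e; exact absurd e hv
    rw [List.map_congr_left step, PySem.List.sum_map_add_int, ih ht,
        pv_sum_if_eq_single S hS a ha g]
    simp [add_comm]

-- A's triple loop computes the count-product sum over the elements of A
theorem pv_algo_x_eq (A : List Int) :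
    algo_x A = (A.map (fun a => (A.count (a + 1) : Int) * (A.count (a + 2) : Int))).sum := by
  show (PySem.List.pyRange 0 (PySem.List.len A)).foldl _ 0 = _
  rw [PySem.List.foldl_pyRange_pyGetD A 0
      (fun x a =>
        (PySem.List.pyRange 0 (PySem.List.len A)).foldl (fun x j =>
          (PySem.List.pyRange 0 (PySem.List.len A)).foldl (fun x k =>
            if PySem.List.pyGetD A k 0 - PySem.List.pyGetD A j 0 = 1 ∧
               PySem.List.pyGetD A j 0 - a = 1
            then x + 1 else x) x) x) 0 le_rfl]
  simp only [Int.toNat_zero, List.drop_zero]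
  have inner : ∀ (a x : Int),
      (PySem.List.pyRange 0 (PySem.List.len A)).foldl (fun x j =>
        (PySem.List.pyRange 0 (PySem.List.len A)).foldl (fun x k =>
          if PySem.List.pyGetD A k 0 - PySem.List.pyGetD A j 0 = 1 ∧
             PySem.List.pyGetD A j 0 - a = 1
          then x + 1 else x) x) x
      = x + (A.count (a + 1) : Int) * (A.count (a + 2) : Int) := by
    intro a x
    rw [PySem.List.foldl_pyRange_pyGetD A 0
        (fun x b =>
          (PySem.List.pyRange 0 (PySem.List.len A)).foldl (fun x k =>
            if PySem.List.pyGetD A k 0 - b = 1 ∧ b - a = 1 then x + 1 else x) x) x le_rfl]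
    simp only [Int.toNat_zero, List.drop_zero]
    have inner2 : ∀ (b x : Int),
        (PySem.List.pyRange 0 (PySem.List.len A)).foldl (fun x k =>
          if PySem.List.pyGetD A k 0 - b = 1 ∧ b - a = 1 then x + 1 else x) x
        = x + (if b = a + 1 then (A.count (b + 1) : Int) else 0) := by
      intro b x
      rw [PySem.List.foldl_pyRange_pyGetD A 0
          (fun x c => if c - b = 1 ∧ b - a = 1 then x + 1 else x) x le_rfl]
      simp only [Int.toNat_zero, List.drop_zero]
      rw [PySem.List.foldl_ite_add_one (fun c => c - b = 1 ∧ b - a = 1) A x]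
      by_cases hba : b = a + 1
      · have hd : ∀ c, (decide (c - b = 1 ∧ b - a = 1)) = (c == b + 1) := by
          intro c
          rcases eq_or_ne c (b + 1) with hc | hc
          · subst hc; simp [hba]
          · have h1 : ¬(c - b = 1 ∧ b - a = 1) := fun w => hc (by omega)
            simp [h1, hc]
        simp only [hd, ← List.count_eq_countP]
        simp [hba]
      · have h0 : List.countP (fun c => decide (c - b = 1 ∧ b - a = 1)) A = 0 :=
          List.countP_eq_zero.mpr (by
            intro c _
            simp only [decide_eq_true_eq, not_and]
            intro _
            omega)
        rw [h0]
        simp [hba]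
    have := PySem.List.foldl_congr_mem
      (l := A) (init := x)
      (f := fun x b =>
        (PySem.List.pyRange 0 (PySem.List.len A)).foldl (fun x k =>
          if PySem.List.pyGetD A k 0 - b = 1 ∧ b - a = 1 then x + 1 else x) x)
      (g := fun x b => x + (if b = a + 1 then (A.count (b + 1) : Int) else 0))
      (fun acc b _ => inner2 b acc)
    rw [this, PySem.List.foldl_add A (fun b => if b = a + 1 then (A.count (b + 1) : Int) else 0) x]
    rw [pv_sum_if_eq_count A (a + 1) (fun b => (A.count (b + 1) : Int))]
    rw [show a + 1 + 1 = a + 2 from by ring]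
  have := PySem.List.foldl_congr_mem
    (l := A) (init := (0 : Int))
    (f := fun x a =>
      (PySem.List.pyRange 0 (PySem.List.len A)).foldl (fun x j =>
        (PySem.List.pyRange 0 (PySem.List.len A)).foldl (fun x k =>
          if PySem.List.pyGetD A k 0 - PySem.List.pyGetD A j 0 = 1 ∧
             PySem.List.pyGetD A j 0 - a = 1
          then x + 1 else x) x) x)
    (g := fun x a => x + (A.count (a + 1) : Int) * (A.count (a + 2) : Int))
    (fun acc a _ => inner a acc)
  rw [this, PySem.List.foldl_add A (fun a => (A.count (a + 1) : Int) * (A.count (a + 2) : Int)) 0]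
  simp

-- B computes the same sum, grouped by distinct values
theorem pv_algo_x_alt_eq (A : List Int) :
    algo_x_alt A = (A.map (fun a => (A.count (a + 1) : Int) * (A.count (a + 2) : Int))).sum := by
  simp only [algo_x_alt, PySem.Dict.foldl_insert_getD_add_one_eq_counter,
    PySem.Dict.items_counter]
  rw [PySem.List.foldl_add ((PySem.Set.ofList A).map (fun k => (k, (A.count k : Int))))
      (fun p => p.2 * PySem.Dict.getD (PySem.Dict.counter A) (p.1 + 1) 0
                    * PySem.Dict.getD (PySem.Dict.counter A) (p.1 + 2) 0) 0]
  simp only [List.map_map, Function.comp_def, PySem.Dict.getD_counter, zero_add]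
  rw [show (fun k => (A.count k : Int) * (A.count (k + 1) : Int) * (A.count (k + 2) : Int))
        = (fun v => (A.count v : Int) * ((A.count (v + 1) : Int) * (A.count (v + 2) : Int))) by
      funext k; ring]
  rw [pv_sum_group (PySem.Set.ofList A) (PySem.Set.nodup_ofList A)
      (fun v => (A.count (v + 1) : Int) * (A.count (v + 2) : Int)) A
      (fun a ha => (PySem.Set.mem_ofList A a).mpr ha)]

-- ===== VERDICT (by name: the statement is the Claim_ definition above) =====
theorem algo_x_spec : Claim_equal_algo_x := by
  intro A _
  unfold Spec_algo_x
  rw [pv_algo_x_eq A, pv_algo_x_alt_eq A]
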